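-- pv_equiv track=rewrite | github.com/therydin-hub/TopptipsApp | app.py | get_triplets
-- ===== SOURCE A (Python) =====
-- def get_triplets(row_str):
--     t1, tx, t2, i = 0, 0, 0, 0
--     while i < len(row_str):
--         char, count = row_str[i], 1
--         while i + 1 < len(row_str) and row_str[i+1] == char: count += 1; i += 1
--         if count == 3:
--             if char == '1': t1 += 1
--             elif char == 'X': tx += 1
--             else: t2 += 1
--         i += 1
--     return t1, tx, t2, t1+tx+t2, max(t1, tx, t2)
-- ===== SOURCE B (Python) =====
-- def get_triplets(row_str):
--     n = len(row_str)
--     t1, tx, t2 = 0, 0, 0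
--     for i in range(n - 2):
--         c = row_str[i]
--         if (row_str[i+1] == c and row_str[i+2] == c
--                 and (i == 0 or row_str[i-1] != c)
--                 and (i + 3 >= n or row_str[i+3] != c)):
--             if c == '1': t1 += 1
--             elif c == 'X': tx += 1
--             else: t2 += 1
--     return t1, tx, t2, t1+tx+t2, max(t1, tx, t2)
-- ===== Notes on version B (the rewrite author's own statement) =====
-- stated objective: alternative
-- what changed: Replaces A's stateful run-length accumulation (nested while loops advancing an index past each run) by a stateless single pass over all 3-character windows, where boundary tests on the neighbours isolate runs of length exactly 3.
import Mathlib
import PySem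

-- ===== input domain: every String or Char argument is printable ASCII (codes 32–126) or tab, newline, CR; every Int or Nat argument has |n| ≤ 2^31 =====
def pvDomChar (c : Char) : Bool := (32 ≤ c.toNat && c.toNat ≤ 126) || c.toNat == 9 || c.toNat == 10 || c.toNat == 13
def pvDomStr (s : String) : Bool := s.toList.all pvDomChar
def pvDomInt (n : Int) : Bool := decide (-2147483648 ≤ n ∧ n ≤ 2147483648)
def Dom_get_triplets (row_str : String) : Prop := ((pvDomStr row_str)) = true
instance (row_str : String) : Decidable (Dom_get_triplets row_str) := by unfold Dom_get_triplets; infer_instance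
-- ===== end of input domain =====

-- B replaces A's stateful run-length accumulation (nested while loops) by a stateless scan of
-- all 3-character windows with neighbour boundary tests; objective: alternative decomposition.

-- ===== PORT A =====
-- inner while loop of A: consume the run of `char`, returning (count, remaining input)
def innerA (c : Char) : List Char → Nat → Nat × List Char
  | [], count => (count, [])
  | x :: xs, count => if x = c then innerA c xs (count + 1) else (count, x :: xs)

theorem innerA_len (c : Char) : ∀ (l : List Char) (count : Nat), (innerA c l count).2.length ≤ l.length := by
  intro l
  induction l with
  | nil => intro count; simp [innerA]
  | cons x xs ih =>
    intro count
    by_cases h : x = c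
    · simpa [innerA, h] using Nat.le_succ_of_le (ih (count + 1))
    · simp [innerA, h]

-- outer while loop of A, state (t1, tx, t2)
def outerA : List Char → Int → Int → Int → Int × Int × Int
  | [], t1, tx, t2 => (t1, tx, t2)
  | c :: rest, t1, tx, t2 =>
    let p := innerA c rest 1
    if p.1 = 3 then
      if c = '1' then outerA p.2 (t1 + 1) tx t2
      else if c = 'X' then outerA p.2 t1 (tx + 1) t2
      else outerA p.2 t1 tx (t2 + 1)
    else outerA p.2 t1 tx t2
termination_by l => l.length
decreasing_by all_goals exact Nat.lt_succ_of_le (innerA_len c rest 1)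

def get_triplets (row_str : String) : Int × Int × Int × Int × Int :=
  let r := outerA row_str.toList 0 0 0
  (r.1, r.2.1, r.2.2, r.1 + r.2.1 + r.2.2, max r.1 (max r.2.1 r.2.2))

-- ===== PORT B =====
-- body of B's for loop: test the 3-character window at i (with boundary checks) and count a hit
def stepB (l : List Char) (n : Nat) (acc : Int × Int × Int) (i : Nat) : Int × Int × Int :=
  let c := l.getD i ' '
  if l.getD (i + 1) ' ' = c ∧ l.getD (i + 2) ' ' = c ∧
      (i = 0 ∨ l.getD (i - 1) ' ' ≠ c) ∧ (i + 3 ≥ n ∨ l.getD (i + 3) ' ' ≠ c) then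
    if c = '1' then (acc.1 + 1, acc.2.1, acc.2.2)
    else if c = 'X' then (acc.1, acc.2.1 + 1, acc.2.2)
    else (acc.1, acc.2.1, acc.2.2 + 1)
  else acc

def get_triplets_alt (row_str : String) : Int × Int × Int × Int × Int :=
  let l := row_str.toList
  let n := l.length
  let r := (List.range (n - 2)).foldl (stepB l n) (0, 0, 0)
  (r.1, r.2.1, r.2.2, r.1 + r.2.1 + r.2.2, max r.1 (max r.2.1 r.2.2))

-- ===== PRECONDITION & SPEC =====
def Spec_get_triplets (row_str : String) (out : Int × Int × Int × Int × Int) : Prop := out = get_triplets_alt row_str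
instance (row_str : String) (out : Int × Int × Int × Int × Int) : Decidable (Spec_get_triplets row_str out) := by unfold Spec_get_triplets; infer_instance

-- ===== CLAIM (what is proved, stated in full; the proofs are below) =====
def Claim_equal_get_triplets : Prop := ∀ (row_str : String), Dom_get_triplets row_str → Spec_get_triplets row_str (get_triplets row_str)

-- ===== LEMMAS AND PROOFS =====

-- the contribution of one window hit for character c
def uvec (c : Char) : Int × Int × Int :=
  if c = '1' then (1, 0, 0) else if c = 'X' then (0, 1, 0) else (0, 0, 1)

-- the contribution of index i in B's loop
def deltaB (l : List Char) (n i : Nat) : Int × Int × Int := stepB l n (0, 0, 0) i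

-- B's total count
def countB (l : List Char) : Int × Int × Int :=
  ((List.range (l.length - 2)).map (deltaB l l.length)).sum

theorem stepB_eq (l : List Char) (n : Nat) (acc : Int × Int × Int) (i : Nat) :
    stepB l n acc i = acc + deltaB l n i := by
  unfold deltaB stepB
  dsimp only
  rcases acc with ⟨a, b, c⟩
  split_ifs <;> simp

theorem foldl_stepB (l : List Char) (n : Nat) :
    ∀ (is : List Nat) (acc : Int × Int × Int),
      is.foldl (stepB l n) acc = acc + (is.map (deltaB l n)).sum := by
  intro is
  induction is with
  | nil => intro acc; simp
  | cons i is ih => intro acc; simp [List.foldl_cons, stepB_eq, ih, add_assoc]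

theorem getD_rep_app_lt {k i : Nat} (c : Char) (r : List Char) (h : i < k) :
    (List.replicate k c ++ r).getD i ' ' = c := by
  simp [List.getD, List.getElem?_append_left (by simpa using h : i < (List.replicate k c).length), h]

theorem getD_rep_app_ge {k i : Nat} (c : Char) (r : List Char) (h : k ≤ i) :
    (List.replicate k c ++ r).getD i ' ' = r.getD (i - k) ' ' := by
  simp [List.getD, List.getElem?_append_right (by simpa using h : (List.replicate k c).length ≤ i)]

theorem head_ne (c : Char) (r : List Char) (hr : ∀ x ∈ r.head?, (x = c) → False) (hne : r ≠ []) :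
    r.getD 0 ' ' ≠ c := by
  rcases r with _ | ⟨x, xs⟩
  · exact absurd rfl hne
  · simpa using hr x (by simp)

-- (a) windows starting inside the leading run contribute iff i = 0 and the run has length 3
theorem deltaB_in_run (k : Nat) (c : Char) (r : List Char)
    (hr : ∀ x ∈ r.head?, (x = c) → False) (i : Nat) (hik : i < k)
    (hin : i < k + r.length - 2) :
    deltaB (List.replicate k c ++ r) (k + r.length) i =
      (if i = 0 ∧ k = 3 then uvec c else 0) := by
  have hlen : (List.replicate k c ++ r).length = k + r.length := by simp
  unfold deltaB stepB
  dsimp only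
  rw [getD_rep_app_lt c r hik]
  rcases Nat.eq_zero_or_pos i with hi0 | hipos
  · subst hi0
    by_cases hk3 : k = 3
    · subst hk3
      rw [getD_rep_app_lt c r (by omega), getD_rep_app_lt c r (by omega)]
      have hlast : (0 : Nat) + 3 ≥ 3 + r.length ∨ (List.replicate 3 c ++ r).getD (0 + 3) ' ' ≠ c := by
        rcases Nat.eq_zero_or_pos r.length with h0 | h1
        · left; omega
        · right
          rw [getD_rep_app_ge c r (by omega)]
          simpa using head_ne c r hr (by intro h; subst h; simp at h1)
      have hcondtrue : (c = c ∧ c = c ∧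
          ((0:Nat) = 0 ∨ (List.replicate 3 c ++ r).getD (0 - 1) ' ' ≠ c) ∧
          ((0:Nat) + 3 ≥ 3 + r.length ∨ (List.replicate 3 c ++ r).getD (0 + 3) ' ' ≠ c)) :=
        ⟨rfl, rfl, Or.inl rfl, hlast⟩
      rw [if_pos hcondtrue]
      simp [uvec]
    · -- k ≠ 3 : the window at 0 is not a hit
      have hfail : ¬ ((List.replicate k c ++ r).getD (0 + 1) ' ' = c ∧
          (List.replicate k c ++ r).getD (0 + 2) ' ' = c ∧
          ((0 : Nat) = 0 ∨ (List.replicate k c ++ r).getD (0 - 1) ' ' ≠ c) ∧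
          ((0 : Nat) + 3 ≥ k + r.length ∨ (List.replicate k c ++ r).getD (0 + 3) ' ' ≠ c)) := by
        rcases Nat.lt_or_ge k 4 with hk4 | hk4
        · -- k ≤ 2 here
          have hrne : r ≠ [] := by
            intro h; subst h; simp at hin; omega
          interval_cases k
          · -- k = 1
            rintro ⟨h1, -, -, -⟩
            rw [getD_rep_app_ge c r (by omega)] at h1
            exact head_ne c r hr hrne (by simpa using h1)
          · -- k = 2
            rintro ⟨-, h2, -, -⟩
            rw [getD_rep_app_ge c r (by omega)] at h2
            exact head_ne c r hr hrne (by simpa using h2)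
          · exact absurd rfl hk3
        · -- k ≥ 4
          rintro ⟨-, -, -, h4 | h4⟩
          · omega
          · exact h4 (getD_rep_app_lt c r (by omega))
      rw [if_neg hfail]
      simp [hk3]

  · -- i ≥ 1 : the left neighbour equals c, no hit
    have hfail : ¬ ((List.replicate k c ++ r).getD (i + 1) ' ' = c ∧
        (List.replicate k c ++ r).getD (i + 2) ' ' = c ∧
        (i = 0 ∨ (List.replicate k c ++ r).getD (i - 1) ' ' ≠ c) ∧
        (i + 3 ≥ k + r.length ∨ (List.replicate k c ++ r).getD (i + 3) ' ' ≠ c)) := by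
      rintro ⟨-, -, h0 | hne, -⟩
      · omega
      · exact hne (getD_rep_app_lt c r (by omega))
    rw [if_neg hfail]
    rw [if_neg (by omega : ¬(i = 0 ∧ k = 3))]
    rfl

-- (b) windows starting past the leading run are the windows of the remainder
theorem deltaB_shift (k : Nat) (c : Char) (r : List Char) (hk : 1 ≤ k)
    (hr : ∀ x ∈ r.head?, (x = c) → False) (j : Nat) (hj : j < r.length - 2) :
    deltaB (List.replicate k c ++ r) (k + r.length) (k + j) = deltaB r r.length j := by
  unfold deltaB stepB
  dsimp only
  have g0 : (List.replicate k c ++ r).getD (k + j) ' ' = r.getD j ' ' := by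
    rw [getD_rep_app_ge c r (by omega)]; congr 1; omega
  have g1 : (List.replicate k c ++ r).getD (k + j + 1) ' ' = r.getD (j + 1) ' ' := by
    rw [getD_rep_app_ge c r (by omega)]; congr 1; omega
  have g2 : (List.replicate k c ++ r).getD (k + j + 2) ' ' = r.getD (j + 2) ' ' := by
    rw [getD_rep_app_ge c r (by omega)]; congr 1; omega
  have g3 : (List.replicate k c ++ r).getD (k + j + 3) ' ' = r.getD (j + 3) ' ' := by
    rw [getD_rep_app_ge c r (by omega)]; congr 1; omega
  rw [g0, g1, g2, g3]
  have hcond : ((k + j = 0) ∨ (List.replicate k c ++ r).getD (k + j - 1) ' ' ≠ r.getD j ' ') ↔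
      ((j = 0) ∨ r.getD (j - 1) ' ' ≠ r.getD j ' ') := by
    rcases Nat.eq_zero_or_pos j with hj0 | hjpos
    · subst hj0
      constructor
      · intro _; left; rfl
      · intro _
        right
        rw [getD_rep_app_lt c r (by omega)]
        have hne := head_ne c r hr (by intro h; subst h; simp at hj)
        exact fun h => hne h.symm
    · have : (List.replicate k c ++ r).getD (k + j - 1) ' ' = r.getD (j - 1) ' ' := by
        rw [getD_rep_app_ge c r (by omega)]; congr 1; omega
      rw [this]
      constructor
      · rintro (h | h)
        · omega
        · exact Or.inr h
      · rintro (h | h)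
        · omega
        · exact Or.inr h
  have hlen : (k + j + 3 ≥ k + r.length) ↔ (j + 3 ≥ r.length) := by omega
  rw [if_congr (by rw [hcond, hlen]) rfl rfl]

-- sum of the in-run contributions
theorem sum_in_run (k : Nat) (c : Char) (r : List Char)
    (hr : ∀ x ∈ r.head?, (x = c) → False) (K : Nat) (hK : K ≤ k)
    (hKn : K ≤ k + r.length - 2) :
    ((List.range K).map (deltaB (List.replicate k c ++ r) (k + r.length))).sum =
      (if 1 ≤ K ∧ k = 3 then uvec c else 0) := by
  induction K with
  | zero => simp
  | succ K ih =>
    rw [List.range_succ, List.map_append, List.sum_append]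
    rw [ih (by omega) (by omega)]
    rw [List.map_singleton, List.sum_singleton]
    rw [deltaB_in_run k c r hr K (by omega) (by omega)]
    rcases Nat.eq_zero_or_pos K with h0 | hpos
    · subst h0; by_cases hk3 : k = 3 <;> simp [hk3]
    · by_cases hk3 : k = 3 <;> simp [hk3, Nat.pos_iff_ne_zero.mp hpos, (by omega : 1 ≤ K), (by omega : 1 ≤ K + 1)]
  
-- the key run-decomposition identity for B's count
theorem countB_run (k : Nat) (c : Char) (r : List Char) (hk : 1 ≤ k)
    (hr : ∀ x ∈ r.head?, (x = c) → False) :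
    countB (List.replicate k c ++ r) = (if k = 3 then uvec c else 0) + countB r := by
  have hlen : (List.replicate k c ++ r).length = k + r.length := by simp
  unfold countB
  rw [hlen]
  rcases Nat.lt_or_ge r.length 2 with hm | hm
  · -- remainder too short for any window: everything is an in-run window
    have hr2 : r.length - 2 = 0 := by omega
    have hsplit : k + r.length - 2 ≤ k := by omega
    rw [sum_in_run k c r hr (k + r.length - 2) hsplit (le_refl _)]
    rw [hr2]
    simp only [List.range_zero, List.map_nil, List.sum_nil, add_zero]
    by_cases hk3 : k = 3
    · subst hk3
      rw [if_pos ⟨(by omega), rfl⟩, if_pos rfl]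
    · simp [hk3]
  · -- split range (k + m - 2) = range k ++ shifted range (m - 2)
    have hdecomp : k + r.length - 2 = k + (r.length - 2) := by omega
    rw [hdecomp, List.range_add, List.map_append, List.sum_append]
    rw [sum_in_run k c r hr k (le_refl k) (by omega)]
    have hshift : ((List.range (r.length - 2)).map (k + ·)).map
        (deltaB (List.replicate k c ++ r) (k + r.length)) =
        (List.range (r.length - 2)).map (deltaB r r.length) := by
      rw [List.map_map]
      apply List.map_congr_left
      intro j hj
      simp only [Function.comp_apply]
      exact deltaB_shift k c r hk hr j (List.mem_range.mp hj)
    rw [hshift]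
    congr 1
    by_cases hk3 : k = 3 <;> simp [hk3, (by omega : 1 ≤ k)]

-- innerA computes the run length and the remainder
theorem innerA_eq (c : Char) : ∀ (l : List Char) (count : Nat),
    innerA c l count = (count + (l.takeWhile (· = c)).length, l.dropWhile (· = c)) := by
  intro l
  induction l with
  | nil => intro count; simp [innerA]
  | cons x xs ih =>
    intro count
    by_cases h : x = c
    · simp [innerA, h, ih]
      omega
    · simp [innerA, h]

-- decomposition of a nonempty list at its first run
theorem run_decomp (c : Char) (rest : List Char) :
    c :: rest = List.replicate (1 + (rest.takeWhile (· = c)).length) c ++ rest.dropWhile (· = c) := by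
  have htw : rest.takeWhile (· = c) = List.replicate (rest.takeWhile (· = c)).length c := by
    apply List.eq_replicate_of_mem
    intro x hx
    simpa using List.mem_takeWhile_imp hx
  rw [Nat.add_comm, List.replicate_succ, List.cons_append, ← htw, List.takeWhile_append_dropWhile]

theorem dropWhile_head_ne (c : Char) (rest : List Char) :
    ∀ x ∈ (rest.dropWhile (· = c)).head?, (x = c) → False := by
  intro x hx hxc
  have := List.head?_dropWhile_not (· = c) rest
  rw [Option.mem_def] at hx
  rw [hx] at this
  simp [hxc] at this

-- main invariant: A's loop equals the accumulator plus B's count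
theorem outerA_eq_countB (l : List Char) (t1 tx t2 : Int) :
    outerA l t1 tx t2 = (t1, tx, t2) + countB l := by
  match l with
  | [] => simp [outerA, countB]
  | c :: rest =>
    have hcount : countB (c :: rest) =
        (if 1 + (rest.takeWhile (· = c)).length = 3 then uvec c else 0) +
          countB (rest.dropWhile (· = c)) := by
      rw [run_decomp c rest]
      exact countB_run _ c _ (by omega) (dropWhile_head_ne c rest)
    rw [outerA]
    rw [innerA_eq c rest 1, hcount]
    split_ifs with h3 h1 hX
    · rw [outerA_eq_countB (rest.dropWhile (· = c)) (t1 + 1) tx t2]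
      simp [uvec, h1, Prod.ext_iff]
      omega
    · rw [outerA_eq_countB (rest.dropWhile (· = c)) t1 (tx + 1) t2]
      simp [uvec, h1, hX, Prod.ext_iff]
      omega
    · rw [outerA_eq_countB (rest.dropWhile (· = c)) t1 tx (t2 + 1)]
      simp [uvec, h1, hX, Prod.ext_iff]
      omega
    · rw [outerA_eq_countB (rest.dropWhile (· = c)) t1 tx t2]
      simp
termination_by l.length
decreasing_by all_goals (simp_wf; exact List.length_dropWhile_le _ _)

-- ===== VERDICT (by name: the statement is the Claim_ definition above) =====
theorem get_triplets_spec : Claim_equal_get_triplets := by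
  intro s _
  unfold Spec_get_triplets get_triplets get_triplets_alt
  dsimp only
  rw [foldl_stepB, outerA_eq_countB]
  rfl
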